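-- pv_equiv track=rewrite | github.com/AgrimSharma/project_python | ScrumDo-Private/scrumdo_web/apps/incoming_email/manager.py | is_auto_responder
-- ===== SOURCE A (Python) =====
-- def is_auto_responder(message):
--     autoresponder_strings = ['X-Autoresponse:',
--                              'X-Autorespond:',
--                              'Subject: Auto Response',
--                              'Out of office',
--                              'Out of the office',
--                              'autoreply']
--     for test in autoresponder_strings:
--         if test in message['raw_msg']:
--             return True
--     return False
-- ===== SOURCE B (Python) =====
-- import re
--
-- _AUTO_PATTERN = re.compile('|'.join(re.escape(s) for s in (
--     'X-Autoresponse:',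
--     'X-Autorespond:',
--     'Subject: Auto Response',
--     'Out of office',
--     'Out of the office',
--     'autoreply',
-- )))
--
--
-- def is_auto_responder(message):
--     return bool(_AUTO_PATTERN.search(message['raw_msg']))
-- ===== Notes on version B (the rewrite author's own statement) =====
-- stated objective: idiomatic
-- what changed: Replaces the loop of six sequential substring searches with one precompiled alternation regex searched in a single pass over the message.
import Mathlib
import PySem

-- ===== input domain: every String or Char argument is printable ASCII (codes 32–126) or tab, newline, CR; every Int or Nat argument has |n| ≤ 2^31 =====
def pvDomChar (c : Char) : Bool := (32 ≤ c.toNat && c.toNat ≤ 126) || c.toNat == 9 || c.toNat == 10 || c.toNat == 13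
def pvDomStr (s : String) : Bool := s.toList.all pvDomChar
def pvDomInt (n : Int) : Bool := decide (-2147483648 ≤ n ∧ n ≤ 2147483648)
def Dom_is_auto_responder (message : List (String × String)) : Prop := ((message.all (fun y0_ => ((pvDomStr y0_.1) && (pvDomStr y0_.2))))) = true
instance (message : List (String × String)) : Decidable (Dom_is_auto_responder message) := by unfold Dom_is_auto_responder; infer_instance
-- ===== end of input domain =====

-- B replaces A's loop of six sequential substring searches by one alternation-regex search
-- (a single left-to-right scan testing every marker at each position); same answers, idiomatic.

-- ===== PORT A =====
-- A's marker list
def markersA : List String :=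
  ["X-Autoresponse:", "X-Autorespond:", "Subject: Auto Response",
   "Out of office", "Out of the office", "autoreply"]

-- A's for-loop with early return: try each marker with 'test in raw' in order
def loopA (tests : List String) (raw : String) : Bool :=
  match tests with
  | [] => false
  | t :: rest => if PySem.Str.isIn t raw then true else loopA rest raw

def is_auto_responder (message : List (String × String)) : Bool :=
  match message.lookup "raw_msg" with
  | none => false            -- Python raises KeyError here; excluded by Pre_
  | some raw => loopA markersA raw

-- ===== PORT B =====
-- B's marker list (the regex alternatives, in pattern order)
def markersB : List String :=
  ["X-Autoresponse:", "X-Autorespond:", "Subject: Auto Response",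
   "Out of office", "Out of the office", "autoreply"]

-- re.search of a literal alternation of re.escape'd strings: the engine scans the text
-- left to right and at each position tries every alternative as a prefix; exact here.
def searchAlt (alts : List (List Char)) : List Char → Bool
  | [] => alts.any (fun a => PySem.Chars.startswith [] a)
  | c :: t => alts.any (fun a => PySem.Chars.startswith (c :: t) a) || searchAlt alts t

def is_auto_responder_alt (message : List (String × String)) : Bool :=
  match message.lookup "raw_msg" with
  | none => false            -- Python raises KeyError here; excluded by Pre_
  | some raw => searchAlt (markersB.map String.toList) raw.toList

-- ===== PRECONDITION & SPEC =====
-- A (and B) raise KeyError when the 'raw_msg' key is absent; exactly those inputs are excluded.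
def Pre_is_auto_responder (message : List (String × String)) : Prop :=
  (message.lookup "raw_msg").isSome = true
instance (message : List (String × String)) : Decidable (Pre_is_auto_responder message) := by
  unfold Pre_is_auto_responder; infer_instance

def pvWitness_is_auto_responder : (List (String × String)) := [("raw_msg", "hello Out of office")]

def Spec_is_auto_responder (message : List (String × String)) (out : Bool) : Prop := out = is_auto_responder_alt message
instance (message : List (String × String)) (out : Bool) : Decidable (Spec_is_auto_responder message out) := by unfold Spec_is_auto_responder; infer_instance

-- ===== CLAIM (what is proved, stated in full; the proofs are below) =====
def Claim_equal_is_auto_responder : Prop := ∀ (message : List (String × String)), Dom_is_auto_responder message → Pre_is_auto_responder message → Spec_is_auto_responder message (is_auto_responder message)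

-- ===== LEMMAS AND PROOFS =====

-- B's scan finds exactly the texts with some alternative as an infix
theorem searchAlt_iff (alts : List (List Char)) (s : List Char) :
    searchAlt alts s = true ↔ ∃ a ∈ alts, a <:+: s := by
  induction s with
  | nil =>
      simp [searchAlt, List.any_eq_true, PySem.Chars.startswith_iff,
        List.prefix_nil, List.infix_nil]
  | cons c t ih =>
      simp only [searchAlt, Bool.or_eq_true, List.any_eq_true,
        PySem.Chars.startswith_iff, ih, List.infix_cons_iff]
      constructor
      · rintro (⟨a, ha, hp⟩ | ⟨a, ha, hi⟩)
        · exact ⟨a, ha, Or.inl hp⟩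
        · exact ⟨a, ha, Or.inr hi⟩
      · rintro ⟨a, ha, hp | hi⟩
        · exact Or.inl ⟨a, ha, hp⟩
        · exact Or.inr ⟨a, ha, hi⟩

-- A's early-return loop finds exactly the texts with some marker as an infix
theorem loopA_iff (tests : List String) (raw : String) :
    loopA tests raw = true ↔ ∃ t ∈ tests, t.toList <:+: raw.toList := by
  induction tests with
  | nil => simp [loopA]
  | cons t rest ih =>
      simp only [loopA]
      by_cases h : t.toList <:+: raw.toList
      · simp [PySem.Str.isIn, PySem.Chars.isIn_iff_infix, h]
      · simp [PySem.Str.isIn, PySem.Chars.isIn_iff_infix, h, ih]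

-- ===== VERDICT (by name: the statement is the Claim_ definition above) =====
theorem is_auto_responder_spec : Claim_equal_is_auto_responder := by
  intro message _ _
  unfold Spec_is_auto_responder is_auto_responder is_auto_responder_alt
  cases h : message.lookup "raw_msg" with
  | none => rfl
  | some raw =>
      rw [Bool.eq_iff_iff, loopA_iff, searchAlt_iff]
      simp [markersA, markersB]
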